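-- pv_equiv track=rewrite | github.com/newfull5/Programmers | 옹알이 (1).py | check_speakable
-- ===== SOURCE A (Python) =====
-- def check_speakable(bab):
--     words = ['aya', 'woo', 'ye', 'ma']
--
--     for word in words:
--         if word in bab:
--             return check_speakable(bab.replace(word, ' '))
--     else:
--         if bab.replace(' ', ''):
--             return False
--         return True
-- ===== SOURCE B (Python) =====
-- def check_speakable(bab):
--     stripped = (bab.replace('aya', ' ')
--                    .replace('woo', ' ')
--                    .replace('ye', ' ')
--                    .replace('ma', ' ')
--                    .replace(' ', ''))
--     return stripped == ''
-- ===== Notes on version B (the rewrite author's own statement) =====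
-- stated objective: simpler
-- what changed: Replaced the restart-from-the-top recursion with a single straight-line chain of four replace calls (no loop or recursion), justified by the fact that replacing a word with a space can never create a new occurrence of any word.
import Mathlib
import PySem

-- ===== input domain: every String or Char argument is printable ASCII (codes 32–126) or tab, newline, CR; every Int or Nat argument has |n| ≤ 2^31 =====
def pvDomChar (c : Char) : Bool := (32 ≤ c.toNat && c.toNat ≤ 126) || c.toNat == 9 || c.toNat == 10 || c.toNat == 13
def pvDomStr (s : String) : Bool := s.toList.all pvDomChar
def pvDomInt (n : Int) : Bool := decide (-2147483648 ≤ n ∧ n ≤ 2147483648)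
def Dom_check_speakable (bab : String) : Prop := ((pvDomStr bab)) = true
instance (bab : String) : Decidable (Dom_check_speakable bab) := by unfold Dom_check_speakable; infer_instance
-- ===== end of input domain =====

-- B replaces A's restart-from-the-top recursion by a single straight-line chain of four
-- replace calls (objective: simpler); replacing a word with a space never creates a new
-- occurrence of any word, which is what the lemmas below establish.

-- ===== PORT A =====
-- rsp old l is the greedy left-to-right "replace every occurrence of old by a space"
-- (the semantics of Python's str.replace(old, ' ') for old ≠ ''); it is only used to
-- reason about PySem.Chars.replace and to justify A's termination.

def rsp (old : List Char) : List Char → List Char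
  | [] => []
  | c :: t =>
    if h : old ≠ [] ∧ old.isPrefixOf (c :: t) then
      ' ' :: rsp old ((c :: t).drop old.length)
    else
      c :: rsp old t
termination_by l => l.length
decreasing_by
  · simp only [List.length_drop, List.length_cons]
    have : 1 ≤ old.length := by
      cases old with
      | nil => exact absurd rfl h.1
      | cons a b => simp
    omega
  · simp

theorem go_eq_rsp (old : List Char) (h : old ≠ []) :
    ∀ (fuel : Nat) (l acc : List Char), l.length ≤ fuel →
      PySem.Chars.replace.go old [' '] fuel l acc = acc.reverse ++ rsp old l := by
  intro fuel
  induction fuel with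
  | zero =>
    intro l acc hl
    have : l = [] := by
      cases l with
      | nil => rfl
      | cons c t => simp at hl
    subst this
    simp [PySem.Chars.replace.go, rsp]
  | succ n ih =>
    intro l acc hl
    cases l with
    | nil => simp [PySem.Chars.replace.go, rsp]
    | cons c t =>
      rw [PySem.Chars.replace.go]
      by_cases hp : old.isPrefixOf (c :: t)
      · rw [if_pos hp]
        have hol : 1 ≤ old.length := by cases old with
          | nil => exact absurd rfl h
          | cons a b => simp
        have hdl : ((c :: t).drop old.length).length ≤ n := by
          simp only [List.length_drop, List.length_cons]
          simp only [List.length_cons] at hl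
          omega
        rw [ih _ _ hdl]
        rw [rsp]
        rw [dif_pos ⟨h, hp⟩]
        simp
      · rw [if_neg hp]
        have : t.length ≤ n := by simp at hl; omega
        rw [ih _ _ this]
        rw [rsp, dif_neg (by tauto)]
        simp

theorem replace_eq_rsp (l old : List Char) (h : old ≠ []) :
    PySem.Chars.replace l old [' '] = rsp old l := by
  rw [PySem.Chars.replace]
  rw [if_neg (by simpa using h)]
  simpa using go_eq_rsp old h l.length l [] le_rfl

theorem rsp_len_le (old l : List Char) : (rsp old l).length ≤ l.length := by
  fun_induction rsp with
  | case1 => simp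
  | case2 c t h ih =>
    have := (List.isPrefixOf_iff_prefix.mp h.2).length_le
    simp only [List.length_cons, List.length_drop, List.length_cons] at *
    have : 1 ≤ old.length := by
      cases old with
      | nil => exact absurd rfl h.1
      | cons a b => simp
    omega
  | case3 c t h ih => simpa using ih

theorem rsp_len_lt (old l : List Char) (h2 : 2 ≤ old.length) (hin : old <:+: l) :
    (rsp old l).length < l.length := by
  fun_induction rsp with
  | case1 =>
    rw [List.infix_nil] at hin
    subst hin; simp at h2
  | case2 c t h ih =>
    have hle := rsp_len_le old ((c :: t).drop old.length)
    have := (List.isPrefixOf_iff_prefix.mp h.2).length_le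
    simp only [List.length_cons, List.length_drop, List.length_cons] at *
    omega
  | case3 c t h ih =>
    have hnp : ¬ old.isPrefixOf (c :: t) := by
      intro hp; exact h ⟨by intro he; subst he; simp at h2, hp⟩
    have : old <:+: t := by
      rcases List.infix_cons_iff.mp hin with hpre | hinf
      · exact absurd (List.isPrefixOf_iff_prefix.mpr hpre) hnp
      · exact hinf
    have := ih this
    simp only [List.length_cons]
    omega


-- length strictly decreases when a word of length ≥ 2 is replaced by ' ' — cited by
-- check_speakable's decreasing_by.
theorem replace_toList_len_lt (s w : String) (h2 : 2 ≤ w.toList.length)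
    (hin : PySem.Str.isIn w s = true) :
    (PySem.Str.replace s w " ").toList.length < s.toList.length := by
  have h0 : w.toList ≠ [] := by intro h; rw [h] at h2; simp at h2
  rw [PySem.Str.toList_replace]
  have : (" " : String).toList = [' '] := rfl
  rw [this, replace_eq_rsp _ _ h0]
  exact rsp_len_lt _ _ h2 ((PySem.Str.isIn_iff_infix w s).mp hin)

-- literal transliteration of A: the for-loop over the 4-word literal list unrolled in
-- order, each hit restarting the whole check recursively on bab.replace(word, ' ').
def check_speakable (bab : String) : Bool :=
  if PySem.Str.isIn "aya" bab then check_speakable (PySem.Str.replace bab "aya" " ")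
  else if PySem.Str.isIn "woo" bab then check_speakable (PySem.Str.replace bab "woo" " ")
  else if PySem.Str.isIn "ye" bab then check_speakable (PySem.Str.replace bab "ye" " ")
  else if PySem.Str.isIn "ma" bab then check_speakable (PySem.Str.replace bab "ma" " ")
  else if PySem.Str.replace bab " " "" ≠ "" then false
  else true
termination_by bab.toList.length
decreasing_by
  all_goals exact replace_toList_len_lt _ _ (by decide) (by assumption)

-- ===== PORT B =====
def check_speakable_alt (bab : String) : Bool :=
  PySem.Str.replace
      (PySem.Str.replace
        (PySem.Str.replace
          (PySem.Str.replace
            (PySem.Str.replace bab "aya" " ")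
            "woo" " ")
          "ye" " ")
        "ma" " ")
      " " "" == ""

-- ===== PRECONDITION & SPEC =====
def Spec_check_speakable (bab : String) (out : Bool) : Prop := out = check_speakable_alt bab
instance (bab : String) (out : Bool) : Decidable (Spec_check_speakable bab out) := by unfold Spec_check_speakable; infer_instance

-- ===== CLAIM (what is proved, stated in full; the proofs are below) =====
def Claim_equal_check_speakable : Prop := ∀ (bab : String), Dom_check_speakable bab → Spec_check_speakable bab (check_speakable bab)

-- ===== LEMMAS AND PROOFS =====
theorem rsp_pres_prefix (old l : List Char) :
    ∀ w : List Char, ' ' ∉ w → w <+: rsp old l → w <+: l := by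
  induction l using rsp.induct old with
  | case1 =>
    intro w hw h
    exact (List.prefix_nil.mp (by simpa [rsp] using h)) ▸ List.nil_prefix
  | case2 c t hg ih =>
    intro w hw h
    rw [rsp, dif_pos hg] at h
    cases w with
    | nil => exact List.nil_prefix
    | cons a w' =>
      have := List.cons_prefix_cons.mp h
      exact absurd (this.1 ▸ List.mem_cons_self) hw
  | case3 c t hg ih =>
    intro w hw h
    rw [rsp, dif_neg hg] at h
    cases w with
    | nil => exact List.nil_prefix
    | cons a w' =>
      have := List.cons_prefix_cons.mp h
      exact List.cons_prefix_cons.mpr ⟨this.1, ih w' (fun m => hw (List.mem_cons_of_mem a m)) this.2⟩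

theorem rsp_pres_infix (old w l : List Char) (hw : ' ' ∉ w) (h : w <:+: rsp old l) :
    w <:+: l := by
  induction l using rsp.induct old with
  | case1 => simpa [rsp] using h
  | case2 c t hg ih =>
    rw [rsp, dif_pos hg] at h
    rcases List.infix_cons_iff.mp h with hp | hi
    · cases w with
      | nil => exact List.nil_infix
      | cons a w' =>
        have := List.cons_prefix_cons.mp hp
        exact absurd (this.1 ▸ List.mem_cons_self) hw
    · exact (ih hi).trans (List.drop_suffix _ _).isInfix
  | case3 c t hg ih =>
    rw [rsp, dif_neg hg] at h
    rcases List.infix_cons_iff.mp h with hp | hi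
    · cases w with
      | nil => exact List.nil_infix
      | cons a w' =>
        have hc := List.cons_prefix_cons.mp hp
        have : w' <+: t := rsp_pres_prefix old t w' (fun m => hw (List.mem_cons_of_mem a m)) hc.2
        exact (List.cons_prefix_cons.mpr ⟨hc.1, this⟩).isInfix
    · exact List.infix_cons_iff.mpr (Or.inr (ih hi))

theorem rsp_not_prefix_self (old l : List Char) (h0 : old ≠ []) (hw : ' ' ∉ old) :
    ¬ old <+: rsp old l := by
  induction l using rsp.induct old with
  | case1 => intro h; exact h0 (List.prefix_nil.mp (by simpa [rsp] using h))
  | case2 c t hg ih =>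
    rw [rsp, dif_pos hg]
    intro h
    cases old with
    | nil => exact h0 rfl
    | cons a o' =>
      have := List.cons_prefix_cons.mp h
      exact hw (this.1 ▸ List.mem_cons_self)
  | case3 c t hg ih =>
    rw [rsp, dif_neg hg]
    intro h
    cases old with
    | nil => exact h0 rfl
    | cons a o' =>
      have hc := List.cons_prefix_cons.mp h
      have : o' <+: t := rsp_pres_prefix (a :: o') t o' (fun m => hw (List.mem_cons_of_mem a m)) hc.2
      exact hg ⟨h0, List.isPrefixOf_iff_prefix.mpr (List.cons_prefix_cons.mpr ⟨hc.1, this⟩)⟩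

theorem rsp_not_infix_self (old l : List Char) (h0 : old ≠ []) (hw : ' ' ∉ old) :
    ¬ old <:+: rsp old l := by
  induction l using rsp.induct old with
  | case1 => intro h; exact h0 (by simpa [rsp, List.infix_nil] using h)
  | case2 c t hg ih =>
    rw [rsp, dif_pos hg]
    intro h
    rcases List.infix_cons_iff.mp h with hp | hi
    · cases old with
      | nil => exact h0 rfl
      | cons a o' => exact hw ((List.cons_prefix_cons.mp hp).1 ▸ List.mem_cons_self)
    · exact ih hi
  | case3 c t hg ih =>
    intro h
    rw [rsp, dif_neg hg] at h
    rcases List.infix_cons_iff.mp h with hp | hi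
    · have := rsp_not_prefix_self old (c :: t) h0 hw
      rw [rsp, dif_neg hg] at this
      exact this hp
    · exact ih hi

theorem rsp_of_not_infix (old l : List Char) (h : ¬ old <:+: l) : rsp old l = l := by
  induction l using rsp.induct old with
  | case1 => simp [rsp]
  | case2 c t hg ih =>
    exact absurd (List.isPrefixOf_iff_prefix.mp hg.2).isInfix h
  | case3 c t hg ih =>
    rw [rsp, dif_neg hg]
    rw [ih (fun hi => h (List.infix_cons_iff.mpr (Or.inr hi)))]

-- Str-level corollaries ------------------------------------------------------

theorem str_notin_after_self (s w : String) (h0 : w.toList ≠ []) (hw : ' ' ∉ w.toList) :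
    PySem.Str.isIn w (PySem.Str.replace s w " ") = false := by
  rw [← Bool.not_eq_true, PySem.Str.isIn_iff_infix, PySem.Str.toList_replace]
  have hsp : (" " : String).toList = [' '] := rfl
  rw [hsp, replace_eq_rsp _ _ h0]
  exact rsp_not_infix_self _ _ h0 hw

theorem str_notin_pres (s v w : String) (hv : v.toList ≠ []) (hw : ' ' ∉ w.toList)
    (h : PySem.Str.isIn w s = false) :
    PySem.Str.isIn w (PySem.Str.replace s v " ") = false := by
  rw [← Bool.not_eq_true, PySem.Str.isIn_iff_infix, PySem.Str.toList_replace]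
  have hsp : (" " : String).toList = [' '] := rfl
  rw [hsp, replace_eq_rsp _ _ hv]
  intro hi
  have := rsp_pres_infix v.toList w.toList s.toList hw hi
  rw [← Bool.not_eq_true, PySem.Str.isIn_iff_infix] at h
  exact h this

theorem str_replace_id (s v : String) (hv : v.toList ≠ [])
    (h : PySem.Str.isIn v s = false) :
    PySem.Str.replace s v " " = s := by
  rw [PySem.Str.replace]
  have hsp : (" " : String).toList = [' '] := rfl
  rw [hsp, replace_eq_rsp _ _ hv, rsp_of_not_infix]
  · exact String.ofList_toList
  · intro hi
    rw [← Bool.not_eq_true, PySem.Str.isIn_iff_infix] at h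
    exact h hi

-- unfolding A step by step ----------------------------------------------------

theorem A_step1 (u : String) :
    check_speakable u = check_speakable (PySem.Str.replace u "aya" " ") := by
  by_cases h : PySem.Str.isIn "aya" u = true
  · rw [check_speakable, if_pos h]
  · rw [str_replace_id u "aya" (by decide) (by simpa using h)]

theorem A_step2 (u : String) (h1 : PySem.Str.isIn "aya" u = false) :
    check_speakable u = check_speakable (PySem.Str.replace u "woo" " ") := by
  by_cases h : PySem.Str.isIn "woo" u = true
  · rw [check_speakable]
    simp only [h1, Bool.false_eq_true, if_false, h, if_true]
  · rw [str_replace_id u "woo" (by decide) (by simpa using h)]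

theorem A_step3 (u : String) (h1 : PySem.Str.isIn "aya" u = false)
    (h2 : PySem.Str.isIn "woo" u = false) :
    check_speakable u = check_speakable (PySem.Str.replace u "ye" " ") := by
  by_cases h : PySem.Str.isIn "ye" u = true
  · rw [check_speakable]
    simp only [h1, h2, Bool.false_eq_true, if_false, h, if_true]
  · rw [str_replace_id u "ye" (by decide) (by simpa using h)]

theorem A_step4 (u : String) (h1 : PySem.Str.isIn "aya" u = false)
    (h2 : PySem.Str.isIn "woo" u = false) (h3 : PySem.Str.isIn "ye" u = false) :
    check_speakable u = check_speakable (PySem.Str.replace u "ma" " ") := by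
  by_cases h : PySem.Str.isIn "ma" u = true
  · rw [check_speakable]
    simp only [h1, h2, h3, Bool.false_eq_true, if_false, h, if_true]
  · rw [str_replace_id u "ma" (by decide) (by simpa using h)]

theorem A_base (u : String) (h1 : PySem.Str.isIn "aya" u = false)
    (h2 : PySem.Str.isIn "woo" u = false) (h3 : PySem.Str.isIn "ye" u = false)
    (h4 : PySem.Str.isIn "ma" u = false) :
    check_speakable u = (PySem.Str.replace u " " "" == "") := by
  rw [check_speakable]
  simp only [h1, h2, h3, h4, Bool.false_eq_true, if_false]
  by_cases h : PySem.Str.replace u " " "" = ""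
  · simp [h]
  · simp [h]

theorem check_speakable_eq_alt (s : String) :
    check_speakable s = check_speakable_alt s := by
  set t1 := PySem.Str.replace s "aya" " " with ht1
  set t2 := PySem.Str.replace t1 "woo" " " with ht2
  set t3 := PySem.Str.replace t2 "ye" " " with ht3
  set t4 := PySem.Str.replace t3 "ma" " " with ht4
  have n1a : PySem.Str.isIn "aya" t1 = false :=
    str_notin_after_self s "aya" (by decide) (by decide)
  have n2a : PySem.Str.isIn "aya" t2 = false :=
    str_notin_pres t1 "woo" "aya" (by decide) (by decide) n1a
  have n2w : PySem.Str.isIn "woo" t2 = false :=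
    str_notin_after_self t1 "woo" (by decide) (by decide)
  have n3a : PySem.Str.isIn "aya" t3 = false :=
    str_notin_pres t2 "ye" "aya" (by decide) (by decide) n2a
  have n3w : PySem.Str.isIn "woo" t3 = false :=
    str_notin_pres t2 "ye" "woo" (by decide) (by decide) n2w
  have n3y : PySem.Str.isIn "ye" t3 = false :=
    str_notin_after_self t2 "ye" (by decide) (by decide)
  have n4a : PySem.Str.isIn "aya" t4 = false :=
    str_notin_pres t3 "ma" "aya" (by decide) (by decide) n3a
  have n4w : PySem.Str.isIn "woo" t4 = false :=
    str_notin_pres t3 "ma" "woo" (by decide) (by decide) n3w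
  have n4y : PySem.Str.isIn "ye" t4 = false :=
    str_notin_pres t3 "ma" "ye" (by decide) (by decide) n3y
  have n4m : PySem.Str.isIn "ma" t4 = false :=
    str_notin_after_self t3 "ma" (by decide) (by decide)
  calc check_speakable s
      = check_speakable t1 := A_step1 s
    _ = check_speakable t2 := A_step2 t1 n1a
    _ = check_speakable t3 := A_step3 t2 n2a n2w
    _ = check_speakable t4 := A_step4 t3 n3a n3w n3y
    _ = (PySem.Str.replace t4 " " "" == "") := A_base t4 n4a n4w n4y n4m
    _ = check_speakable_alt s := rfl

-- ===== VERDICT (by name: the statement is the Claim_ definition above) =====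
theorem check_speakable_spec : Claim_equal_check_speakable := by
  intro bab _
  unfold Spec_check_speakable
  exact check_speakable_eq_alt bab
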